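-- pv_equiv track=rewrite | github.com/yixiangchen1995/python-Sigilyph | sigilyph/core/text_process.py | replace_sil2label_0808
-- ===== SOURCE A (Python) =====
-- def replace_sil2label_0808(phones):
--     #phones = ['sil_1' if xx == 'sil_lang' else xx for xx in phones]
--     phones = ['' if xx == 'sil_lang' else xx for xx in phones]
--     phones = ['sil_2' if xx == 'sil_punc' else xx for xx in phones]
--     phones = ['sil_2' if xx == 'sil_end' else xx for xx in phones]
--     phones = ['sil_1' if xx == 'sil' else xx for xx in phones]
--     phones = list(filter(None, phones))
--     #outphones = []
--     outphones = ['sil_1']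
--     for ele in phones:
--         if outphones == []:
--             outphones.append(ele)
--         else:
--             if ele.split('_')[0] == 'sil' and outphones[-1].split('_')[0] == 'sil':
--                 #outphones[-1] = 'sil_2'
--                 outphones[-1] = 'sil_1'
--             else:
--                 outphones.append(ele)
--     if outphones[-1].split('_')[0] == 'sil':
--         outphones = outphones[:-1]
--     return outphones
-- ===== SOURCE B (Python) =====
-- def replace_sil2label_0808(phones):
--     rename = {'sil_punc': 'sil_2', 'sil_end': 'sil_2', 'sil': 'sil_1'}
--     toks = ['sil_1'] + [rename.get(x, x) for x in phones if x not in ('sil_lang', '')]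
--
--     def is_sil(t):
--         return t.split('_')[0] == 'sil'
--
--     out = []
--     i, n = 0, len(toks)
--     while i < n:
--         j = i
--         while j < n and is_sil(toks[j]) == is_sil(toks[i]):
--             j += 1
--         if is_sil(toks[i]):
--             out.append('sil_1' if j - i >= 2 else toks[i])
--         else:
--             out.extend(toks[i:j])
--         i = j
--     if out and is_sil(out[-1]):
--         out.pop()
--     return out
-- ===== Notes on version B (the rewrite author's own statement) =====
-- stated objective: alternative
-- what changed: B builds the renamed/filtered token list in one comprehension with a lookup table, then collapses maximal runs of sil tokens with a two-pointer run-grouping pass, instead of A's four separate rewrite passes followed by a fold that destructively overwrites the last output element.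
import Mathlib
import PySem

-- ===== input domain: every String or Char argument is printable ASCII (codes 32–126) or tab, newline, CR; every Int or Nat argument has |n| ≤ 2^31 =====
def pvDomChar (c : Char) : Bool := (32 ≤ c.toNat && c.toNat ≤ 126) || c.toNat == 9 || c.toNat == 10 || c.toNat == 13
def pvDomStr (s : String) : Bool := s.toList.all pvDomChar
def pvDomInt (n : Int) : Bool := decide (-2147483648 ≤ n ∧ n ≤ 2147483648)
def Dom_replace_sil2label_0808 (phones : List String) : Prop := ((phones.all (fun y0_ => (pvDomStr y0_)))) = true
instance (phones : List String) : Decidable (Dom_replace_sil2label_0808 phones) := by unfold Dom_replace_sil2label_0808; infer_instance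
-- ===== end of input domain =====

-- B replaces A's destructive last-element-overwrite loop by a run-grouping (two-pointer) pass; objective: alternative decomposition, same cost.

-- ===== PORT A =====
-- ele.split('_')[0] == 'sil'  (split with nonempty sep is total and returns a nonempty list, so [0] never raises)
def aIsSilHead (s : String) : Bool := ((PySem.Str.split? s "_").getD []).headD "" == "sil"

-- one iteration of A's for-loop over `outphones`
def aStep (outphones : List String) (ele : String) : List String :=
  if outphones = [] then outphones ++ [ele]
  else if aIsSilHead ele && aIsSilHead (outphones.getLastD "") then
    outphones.dropLast ++ ["sil_1"]      -- outphones[-1] = 'sil_1'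
  else outphones ++ [ele]

def replace_sil2label_0808 (phones : List String) : List String :=
  let p1 := phones.map (fun xx => if xx = "sil_lang" then "" else xx)
  let p2 := p1.map (fun xx => if xx = "sil_punc" then "sil_2" else xx)
  let p3 := p2.map (fun xx => if xx = "sil_end" then "sil_2" else xx)
  let p4 := p3.map (fun xx => if xx = "sil" then "sil_1" else xx)
  let p5 := p4.filter (fun xx => xx ≠ "")          -- filter(None, phones)
  let outphones := p5.foldl aStep ["sil_1"]
  -- outphones is never empty here (it starts seeded and aStep never shrinks it), so [-1] never raises
  if aIsSilHead (outphones.getLastD "") then outphones.dropLast else outphones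

-- ===== PORT B =====
def bIsSil (t : String) : Bool := ((PySem.Str.split? t "_").getD []).headD "" == "sil"

-- B's while-loop: consume one maximal run of equal sil-status at a time
def bLoop : List String → List String
  | [] => []
  | t :: rest =>
    let run := t :: rest.takeWhile (fun x => bIsSil x == bIsSil t)
    let tail := rest.dropWhile (fun x => bIsSil x == bIsSil t)
    (if bIsSil t then [if 2 ≤ run.length then "sil_1" else t] else run) ++ bLoop tail
  termination_by l => l.length
  decreasing_by
    have := List.length_dropWhile_le (fun x => bIsSil x == bIsSil t) rest
    simp; omega

def bRename (x : String) : String :=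
  if x = "sil_punc" then "sil_2" else if x = "sil_end" then "sil_2"
  else if x = "sil" then "sil_1" else x

def replace_sil2label_0808_alt (phones : List String) : List String :=
  let toks := "sil_1" :: (phones.filter (fun x => !(x == "sil_lang") && !(x == ""))).map bRename
  let out := bLoop toks
  if (!(out = ([] : List String)) && bIsSil (out.getLastD "")) then out.dropLast else out

-- ===== PRECONDITION & SPEC =====
def Spec_replace_sil2label_0808 (phones : List String) (out : List String) : Prop := out = replace_sil2label_0808_alt phones
instance (phones : List String) (out : List String) : Decidable (Spec_replace_sil2label_0808 phones out) := by unfold Spec_replace_sil2label_0808; infer_instance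

-- ===== CLAIM (what is proved, stated in full; the proofs are below) =====
def Claim_equal_replace_sil2label_0808 : Prop := ∀ (phones : List String), Dom_replace_sil2label_0808 phones → Spec_replace_sil2label_0808 phones (replace_sil2label_0808 phones)

-- ===== LEMMAS AND PROOFS =====

-- characterization of A's fold: only the last element matters
def fA : String → List String → List String
  | last, [] => [last]
  | last, e :: ts => if aIsSilHead e && aIsSilHead last then fA "sil_1" ts else last :: fA e ts

theorem fA_ne_nil (last : String) (ts : List String) : fA last ts ≠ [] := by
  induction ts generalizing last with
  | nil => simp [fA]
  | cons e ts ih =>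
    simp only [fA]
    split
    · exact ih _
    · simp

theorem fold_fA (toks init : List String) (last : String) :
    List.foldl aStep (init ++ [last]) toks = init ++ fA last toks := by
  induction toks generalizing init last with
  | nil => simp [fA]
  | cons e ts ih =>
    simp only [List.foldl_cons, fA]
    have hne : init ++ [last] ≠ [] := by simp
    rw [aStep, if_neg hne]
    rw [List.getLastD_concat]
    by_cases h : (aIsSilHead e && aIsSilHead last) = true
    · rw [if_pos h, if_pos h, List.dropLast_concat, ih]
    · rw [if_neg h, if_neg h, ih (init ++ [last]) e]
      simp

theorem isSil_eq : aIsSilHead = bIsSil := rfl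

theorem bIsSil_sil1 : bIsSil "sil_1" = true := by decide

theorem fA_eq_bLoop (toks : List String) (last : String) :
    fA last toks = bLoop (last :: toks) := by
  induction toks generalizing last with
  | nil =>
    simp only [fA, bLoop, List.takeWhile_nil, List.dropWhile_nil]
    by_cases h : bIsSil last = true <;> simp [h]
  | cons e ts ih =>
    simp only [fA, isSil_eq]
    by_cases hl : bIsSil last = true
    · by_cases he : bIsSil e = true
      · -- both sil: run of length ≥ 2 collapses to "sil_1"
        rw [if_pos (by rw [he, hl]; rfl), ih "sil_1"]
        conv_rhs => rw [bLoop]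
        rw [bLoop]
        simp only [hl, bIsSil_sil1, List.takeWhile_cons, he, beq_self_eq_true, if_pos,
          List.dropWhile_cons]
        simp
      · -- last sil, e not: run is [last] alone
        rw [if_neg (by simp [he]), ih e]
        conv_rhs => rw [bLoop]
        simp [he, hl]
    · -- last not sil
      rw [if_neg (by simp [hl]), ih e]
      have hl' : bIsSil last = false := by simpa using hl
      by_cases he : bIsSil e = true
      · conv_rhs => rw [bLoop]
        simp [he, hl']
      · have he' : bIsSil e = false := by simpa using he
        conv_rhs => rw [bLoop]
        rw [bLoop]
        simp [he', hl']

-- the two preprocessing pipelines agree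
theorem prep_eq (phones : List String) :
    (((((phones.map (fun xx => if xx = "sil_lang" then "" else xx)).map
        (fun xx => if xx = "sil_punc" then "sil_2" else xx)).map
        (fun xx => if xx = "sil_end" then "sil_2" else xx)).map
        (fun xx => if xx = "sil" then "sil_1" else xx)).filter (fun xx => xx ≠ "")) =
    (phones.filter (fun x => !(x == "sil_lang") && !(x == ""))).map bRename := by
  induction phones with
  | nil => rfl
  | cons x xs ih =>
    simp only [List.map_cons, List.filter_cons]
    by_cases h1 : x = "sil_lang"
    · subst h1; simpa using ih
    · by_cases h2 : x = "sil_punc"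
      · subst h2; simpa [bRename] using ih
      · by_cases h3 : x = "sil_end"
        · subst h3; simpa [bRename] using ih
        · by_cases h4 : x = "sil"
          · subst h4; simpa [bRename] using ih
          · by_cases h5 : x = ""
            · subst h5; simpa [h1, h2, h3, h4] using ih
            · have hb : bRename x = x := by simp [bRename, h2, h3, h4]
              simpa [h1, h2, h3, h4, h5, hb] using ih

-- ===== VERDICT (by name: the statement is the Claim_ definition above) =====
theorem replace_sil2label_0808_spec : Claim_equal_replace_sil2label_0808 := by
  intro phones _
  unfold Spec_replace_sil2label_0808 replace_sil2label_0808 replace_sil2label_0808_alt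
  simp only []
  rw [prep_eq]
  set toks := (phones.filter (fun x => !(x == "sil_lang") && !(x == ""))).map bRename with htoks
  have hfold : List.foldl aStep (([] : List String) ++ ["sil_1"]) toks = [] ++ fA "sil_1" toks :=
    fold_fA toks [] "sil_1"
  simp only [List.nil_append] at hfold
  rw [hfold, fA_eq_bLoop]
  have hne : bLoop ("sil_1" :: toks) ≠ [] := by
    rw [← fA_eq_bLoop]; exact fA_ne_nil _ _
  simp [isSil_eq, hne]
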